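-- pv_equiv track=rewrite | github.com/UPECSchoolProjects/SAE2.02-Exploration_algorithmique | TestStemming/stemming.py | find_longest_suffix_and_replace
-- ===== SOURCE A (Python) =====
-- def find_longest_suffix_and_replace(word, suffixes, start_index, replace_with=''):
--     # return the longest suffix in suffixes that is found in word, starting at start_index
--     search_str = word[start_index:]
--     changed = False
--
--     longest_suffix = ""
--     for suffix in suffixes:
--         if search_str.endswith(suffix) and len(suffix) > len(longest_suffix):
--             longest_suffix = suffix
--
--     if longest_suffix != "":
--         word = word[:start_index] + word[start_index:].replace(longest_suffix, replace_with, 1)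
--         changed = True
--
--     return (word, changed)
-- ===== SOURCE B (Python) =====
-- def find_longest_suffix_and_replace(word, suffixes, start_index, replace_with=''):
--     # Different decomposition: instead of scanning the suffix list tracking the
--     # longest match, walk the tail's own suffixes from longest to shortest and
--     # take the first one that is in the suffix set (first match = longest match).
--     search_str = word[start_index:]
--     n = len(search_str)
--     suffix_set = set(suffixes)
--     length_set = {len(s) for s in suffixes}
--     for L in range(n, 0, -1):
--         if L in length_set:
--             cand = search_str[n - L:]
--             if cand in suffix_set:
--                 return (word[:start_index] + search_str.replace(cand, replace_with, 1), True)
--     return (word, False)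
-- ===== Notes on version B (the rewrite author's own statement) =====
-- stated objective: alternative
-- what changed: Instead of scanning the suffix list while tracking the longest matching suffix, B hashes the suffixes (and their lengths) into sets and walks the tail's own suffixes from longest to shortest, returning on the first one found in the set (equal-length matches are the same string, so the result is identical).
import Mathlib
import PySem

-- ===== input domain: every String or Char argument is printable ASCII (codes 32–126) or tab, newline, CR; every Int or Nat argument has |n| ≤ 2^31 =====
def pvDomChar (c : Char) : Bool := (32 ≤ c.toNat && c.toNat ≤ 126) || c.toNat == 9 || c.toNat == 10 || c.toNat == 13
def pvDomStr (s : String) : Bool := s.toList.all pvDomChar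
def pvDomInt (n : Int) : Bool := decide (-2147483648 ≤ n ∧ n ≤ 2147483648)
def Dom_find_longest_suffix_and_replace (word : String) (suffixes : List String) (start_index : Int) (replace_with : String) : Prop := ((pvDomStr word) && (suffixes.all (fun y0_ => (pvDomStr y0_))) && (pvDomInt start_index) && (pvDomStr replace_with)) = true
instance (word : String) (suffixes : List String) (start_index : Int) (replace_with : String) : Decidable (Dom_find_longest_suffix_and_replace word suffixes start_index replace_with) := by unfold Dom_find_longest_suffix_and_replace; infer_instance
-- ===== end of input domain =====

-- B walks the tail's own suffixes from longest to shortest (filtered by a set of the suffix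
-- lengths) and takes the first one present in the suffix set (first match = longest match),
-- instead of A's scan of the list tracking the longest; objective: alternative decomposition.


-- hand port of Python's s.replace(old, new, 1) (count = 1; PySem.Chars.replace is the unlimited
-- form): splice `new` over the FIRST occurrence of `old`, exact including old = "" (find _ [] = 0).
def pvReplace1 (s old new : List Char) : List Char :=
  let i := PySem.Chars.find s old
  if i = -1 then s else s.take i.toNat ++ new ++ s.drop (i.toNat + old.length)

-- A's loop body: 'if search_str.endswith(suffix) and len(suffix) > len(longest_suffix): longest_suffix = suffix'
def pvStep (search_str : List Char) (longest_suffix : List Char) (suffix : String) : List Char :=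
  if PySem.Chars.endswith search_str suffix.toList && decide (suffix.toList.length > longest_suffix.length)
  then suffix.toList else longest_suffix

-- ===== PORT A =====
def find_longest_suffix_and_replace (word : String) (suffixes : List String) (start_index : Int) (replace_with : String) : String × Bool :=
  let search_str := PySem.List.slice word.toList (some start_index) none
  let longest_suffix := suffixes.foldl (pvStep search_str) ([] : List Char)
  if longest_suffix ≠ [] then
    (String.ofList (PySem.List.slice word.toList none (some start_index) ++
       pvReplace1 search_str longest_suffix replace_with.toList), true)
  else (word, false)

-- ===== PORT B =====
-- the loop 'for L in range(n, 0, -1)': search_str[n-L:] with 0 ≤ n-L ≤ n is List.drop (n-L) (exact)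
def pvAltScan (search : List Char) (suffix_set : PySem.Set String) (length_set : PySem.Set Nat) : Nat → Option (List Char)
  | 0 => none
  | L + 1 =>
    if PySem.Set.contains length_set (L + 1) then
      let cand := search.drop (search.length - (L + 1))
      if PySem.Set.contains suffix_set (String.ofList cand) then some cand
      else pvAltScan search suffix_set length_set L
    else pvAltScan search suffix_set length_set L

def find_longest_suffix_and_replace_alt (word : String) (suffixes : List String) (start_index : Int) (replace_with : String) : String × Bool :=
  let search_str := PySem.List.slice word.toList (some start_index) none
  let suffix_set : PySem.Set String := PySem.Set.ofList suffixes
  let length_set : PySem.Set Nat := PySem.Set.ofList (suffixes.map (fun s => s.toList.length))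
  match pvAltScan search_str suffix_set length_set search_str.length with
  | some cand =>
    (String.ofList (PySem.List.slice word.toList none (some start_index) ++
       pvReplace1 search_str cand replace_with.toList), true)
  | none => (word, false)

-- ===== PRECONDITION & SPEC =====
def Spec_find_longest_suffix_and_replace (word : String) (suffixes : List String) (start_index : Int) (replace_with : String) (out : String × Bool) : Prop := out = find_longest_suffix_and_replace_alt word suffixes start_index replace_with
instance (word : String) (suffixes : List String) (start_index : Int) (replace_with : String) (out : String × Bool) : Decidable (Spec_find_longest_suffix_and_replace word suffixes start_index replace_with out) := by unfold Spec_find_longest_suffix_and_replace; infer_instance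

-- ===== CLAIM (what is proved, stated in full; the proofs are below) =====
def Claim_equal_find_longest_suffix_and_replace : Prop := ∀ (word : String) (suffixes : List String) (start_index : Int) (replace_with : String), Dom_find_longest_suffix_and_replace word suffixes start_index replace_with → Spec_find_longest_suffix_and_replace word suffixes start_index replace_with (find_longest_suffix_and_replace word suffixes start_index replace_with)

-- ===== LEMMAS AND PROOFS =====

theorem pvSuffix_eq_drop (u s : List Char) (h : u <:+ s) : u = s.drop (s.length - u.length) := by
  obtain ⟨t, rfl⟩ := h; simp

-- membership in B's two sets, read back as facts about the original list
theorem pvSetContains_iff (suffixes : List String) (c : List Char) :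
    PySem.Set.contains (PySem.Set.ofList suffixes) (String.ofList c) = true ↔
      ∃ s ∈ suffixes, s.toList = c := by
  simp only [PySem.Set.contains, List.contains_iff_mem, PySem.Set.mem_ofList]
  constructor
  · intro h; exact ⟨String.ofList c, h, by simp⟩
  · rintro ⟨s, hs, rfl⟩
    have : String.ofList s.toList = s := String.toList_inj.mp (by simp)
    rwa [this]

theorem pvLenContains_iff (suffixes : List String) (m : Nat) :
    PySem.Set.contains (PySem.Set.ofList (suffixes.map (fun s => s.toList.length))) m = true ↔
      ∃ s ∈ suffixes, s.toList.length = m := by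
  simp [PySem.Set.contains, PySem.Set.mem_ofList]

theorem pvFold_suffix (sch : List Char) (l : List String) :
    ∀ b, b <:+ sch → (l.foldl (pvStep sch) b) <:+ sch := by
  induction l with
  | nil => intro b hb; simpa using hb
  | cons s t ih =>
    intro b hb
    simp only [List.foldl_cons]
    apply ih
    unfold pvStep
    split_ifs with h
    · have h' := Bool.and_eq_true_iff.mp h
      exact (PySem.Chars.endswith_iff sch s.toList).mp h'.1
    · exact hb

theorem pvFold_le (sch : List Char) (l : List String) :
    ∀ b, b.length ≤ (l.foldl (pvStep sch) b).length := by
  induction l with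
  | nil => intro b; simp
  | cons s t ih =>
    intro b
    simp only [List.foldl_cons]
    refine le_trans ?_ (ih (pvStep sch b s))
    unfold pvStep
    split_ifs with h
    · have h' := Bool.and_eq_true_iff.mp h
      exact le_of_lt (by simpa using h'.2)
    · exact le_rfl

theorem pvFold_ub (sch : List Char) (l : List String) :
    ∀ b, ∀ s ∈ l, PySem.Chars.endswith sch s.toList = true →
      s.toList.length ≤ (l.foldl (pvStep sch) b).length := by
  induction l with
  | nil => intro b s hs; simp at hs
  | cons x t ih =>
    intro b s hs hend
    simp only [List.foldl_cons]
    rcases List.mem_cons.mp hs with rfl | hmem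
    · refine le_trans ?_ (pvFold_le sch t (pvStep sch b s))
      unfold pvStep
      split_ifs with h
      · exact le_rfl
      · rw [Bool.and_eq_true] at h
        have h2 := not_and.mp h hend
        simpa using le_of_not_gt (by simpa using h2)
    · exact ih (pvStep sch b x) s hmem hend

theorem pvFold_mem (sch : List Char) (l : List String) :
    ∀ b, l.foldl (pvStep sch) b = b ∨ ∃ s ∈ l, s.toList = l.foldl (pvStep sch) b := by
  induction l with
  | nil => intro b; simp
  | cons x t ih =>
    intro b
    simp only [List.foldl_cons]
    rcases ih (pvStep sch b x) with h | ⟨s, hs, hval⟩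
    · rw [h]
      unfold pvStep
      split_ifs with hc
      · exact Or.inr ⟨x, List.mem_cons_self, rfl⟩
      · exact Or.inl rfl
    · exact Or.inr ⟨s, List.mem_cons_of_mem _ hs, hval⟩

-- pvAltScan returns none when no tail-suffix of length 1..K is in the suffix set
theorem pvScan_none (sch : List Char) (l : List String) (K : Nat)
    (h : ∀ L, 1 ≤ L → L ≤ K →
      ¬ (PySem.Set.contains (PySem.Set.ofList (l.map (fun s => s.toList.length))) L = true ∧
         PySem.Set.contains (PySem.Set.ofList l) (String.ofList (sch.drop (sch.length - L))) = true)) :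
    pvAltScan sch (PySem.Set.ofList l) (PySem.Set.ofList (l.map (fun s => s.toList.length))) K = none := by
  induction K with
  | zero => rfl
  | succ L ih =>
    unfold pvAltScan
    have hrec := ih (fun L' h1 h2 => h L' h1 (by omega))
    by_cases hG : PySem.Set.contains (PySem.Set.ofList (l.map (fun s => s.toList.length))) (L + 1) = true
    · have hP : PySem.Set.contains (PySem.Set.ofList l) (String.ofList (sch.drop (sch.length - (L + 1)))) = false := by
        by_contra hP'
        exact h (L + 1) (by omega) le_rfl ⟨hG, Bool.of_not_eq_false hP'⟩
      simp only [hG, hP, hrec]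
      simp
    · rw [Bool.not_eq_true] at hG
      simp only [hG, hrec]
      simp

-- pvAltScan finds the largest L ≤ K whose tail-suffix is in the suffix set
theorem pvScan_some (sch : List Char) (l : List String) (m : Nat) (hm1 : 1 ≤ m)
    (hG : PySem.Set.contains (PySem.Set.ofList (l.map (fun s => s.toList.length))) m = true)
    (hP : PySem.Set.contains (PySem.Set.ofList l) (String.ofList (sch.drop (sch.length - m))) = true) :
    ∀ K, m ≤ K →
      (∀ L, m < L → L ≤ K →
        ¬ (PySem.Set.contains (PySem.Set.ofList (l.map (fun s => s.toList.length))) L = true ∧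
           PySem.Set.contains (PySem.Set.ofList l) (String.ofList (sch.drop (sch.length - L))) = true)) →
      pvAltScan sch (PySem.Set.ofList l) (PySem.Set.ofList (l.map (fun s => s.toList.length))) K =
        some (sch.drop (sch.length - m)) := by
  intro K
  induction K with
  | zero => omega
  | succ L ih =>
    intro hmK hhi
    unfold pvAltScan
    by_cases hEq : m = L + 1
    · subst hEq
      simp only [hG, hP]
      simp
    · have hlt : m < L + 1 := by omega
      have hrec := ih (by omega) (fun L' h1 h2 => hhi L' h1 (by omega))
      by_cases hG' : PySem.Set.contains (PySem.Set.ofList (l.map (fun s => s.toList.length))) (L + 1) = true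
      · have hP' : PySem.Set.contains (PySem.Set.ofList l) (String.ofList (sch.drop (sch.length - (L + 1)))) = false := by
          by_contra hP''
          exact hhi (L + 1) hlt le_rfl ⟨hG', Bool.of_not_eq_false hP''⟩
        simp only [hG', hP', hrec]
        simp
      · rw [Bool.not_eq_true] at hG'
        simp only [hG', hrec]
        simp

-- the heart: B's descending scan returns exactly A's fold result (none ↔ "")
theorem pvKey (sch : List Char) (l : List String) :
    pvAltScan sch (PySem.Set.ofList l) (PySem.Set.ofList (l.map (fun s => s.toList.length))) sch.length =
      (if l.foldl (pvStep sch) [] = [] then none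
       else some (l.foldl (pvStep sch) [])) := by
  set r := l.foldl (pvStep sch) [] with hr
  by_cases hnil : r = []
  · simp only [hnil, if_true]
    apply pvScan_none
    intro L h1 h2 hLP
    obtain ⟨s, hs, hvl⟩ := (pvSetContains_iff l _).mp hLP.2
    have hend : PySem.Chars.endswith sch s.toList = true := by
      rw [PySem.Chars.endswith_iff, hvl]; exact List.drop_suffix _ _
    have := pvFold_ub sch l [] s hs hend
    rw [← hr, hnil] at this
    simp [hvl] at this
    omega
  · simp only [hnil, if_false]
    have hsuf : r <:+ sch := pvFold_suffix sch l [] List.nil_suffix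
    have hlen : r.length ≤ sch.length := hsuf.length_le
    have hm1 : 1 ≤ r.length := List.length_pos_of_ne_nil hnil
    have hdrop : r = sch.drop (sch.length - r.length) := pvSuffix_eq_drop r sch hsuf
    obtain ⟨s₀, hs₀, hval₀⟩ : ∃ s ∈ l, s.toList = r := by
      rcases pvFold_mem sch l [] with h | h
      · exact absurd (hr.trans h) hnil
      · rw [← hr] at h; exact h
    have hG : PySem.Set.contains (PySem.Set.ofList (l.map (fun s => s.toList.length))) r.length = true :=
      (pvLenContains_iff l r.length).mpr ⟨s₀, hs₀, by rw [hval₀]⟩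
    have hP : PySem.Set.contains (PySem.Set.ofList l) (String.ofList (sch.drop (sch.length - r.length))) = true :=
      (pvSetContains_iff l _).mpr ⟨s₀, hs₀, by rw [hval₀, ← hdrop]⟩
    have := pvScan_some sch l r.length hm1 hG hP sch.length hlen ?_
    · rw [this, ← hdrop]
    · intro L hlo hhi hLP
      obtain ⟨s, hs, hvl⟩ := (pvSetContains_iff l _).mp hLP.2
      have hend : PySem.Chars.endswith sch s.toList = true := by
        rw [PySem.Chars.endswith_iff, hvl]; exact List.drop_suffix _ _
      have hub := pvFold_ub sch l [] s hs hend
      rw [← hr] at hub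
      rw [hvl] at hub
      simp at hub
      omega

-- ===== VERDICT (by name: the statement is the Claim_ definition above) =====
theorem find_longest_suffix_and_replace_spec : Claim_equal_find_longest_suffix_and_replace := by
  intro word suffixes start_index replace_with _
  unfold Spec_find_longest_suffix_and_replace
  unfold find_longest_suffix_and_replace find_longest_suffix_and_replace_alt
  dsimp only
  rw [pvKey]
  by_cases hnil : suffixes.foldl (pvStep (PySem.List.slice word.toList (some start_index) none)) [] = []
  · simp [hnil]
  · simp [hnil]
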